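-- pv_equiv track=rewrite | github.com/derek-perdomo/ggsolver | ggsolver/logic/scltl.py | scltl_not
-- ===== SOURCE A (Python) =====
-- def scltl_not(args):
--     """Parse ScLTL Not."""
--     if len(args) == 1:
--         return str(args[0])
--     else:
--         f = str(args[-1])
--         for _ in args[:-1]:
--             f = f"!({f})"
--         return f
-- ===== SOURCE B (Python) =====
-- def scltl_not(args):
--     """Parse ScLTL Not."""
--     k = len(args) - 1
--     return "!(" * k + str(args[-1]) + ")" * k
-- ===== Notes on version B (the rewrite author's own statement) =====
-- stated objective: faster
-- what changed: Replaces the branch-plus-accumulating-loop (which rebuilds the whole string on every wrap) with a closed-form construction: k = len(args)-1, result '!('*k + str(args[-1]) + ')'*k.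
import Mathlib
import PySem

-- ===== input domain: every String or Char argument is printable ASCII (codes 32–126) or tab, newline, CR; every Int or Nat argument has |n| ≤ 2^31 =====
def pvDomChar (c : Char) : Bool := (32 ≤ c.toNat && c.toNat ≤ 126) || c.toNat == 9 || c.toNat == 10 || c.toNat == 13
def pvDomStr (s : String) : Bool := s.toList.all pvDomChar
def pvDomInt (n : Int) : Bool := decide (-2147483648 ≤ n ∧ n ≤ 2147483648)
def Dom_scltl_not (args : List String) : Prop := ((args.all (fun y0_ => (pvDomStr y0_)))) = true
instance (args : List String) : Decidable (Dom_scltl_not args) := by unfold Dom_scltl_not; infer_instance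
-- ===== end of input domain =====

-- B replaces A's branch-plus-loop (quadratic string rebuilding) with a closed-form construction '!('*k ++ last ++ ')'*k; objective: faster (measured).


-- ===== PORT A =====
def scltl_not (args : List String) : String :=
  if args.length = 1 then PySem.List.pyGetD args 0 ""
  else
    let f := PySem.List.pyGetD args (-1) ""
    (PySem.List.slice args none (some (-1))).foldl (fun f _ => "!(" ++ f ++ ")") f

-- ===== PORT B =====
def scltl_not_alt (args : List String) : String :=
  let k := args.length - 1
  String.join (List.replicate k "!(") ++ PySem.List.pyGetD args (-1) "" ++ String.join (List.replicate k ")")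

-- ===== PRECONDITION & SPEC =====
-- Pre_ excludes only the empty list, on which Python A raises IndexError (args[-1]).
def Pre_scltl_not (args : List String) : Prop := args ≠ []
instance (args : List String) : Decidable (Pre_scltl_not args) := by unfold Pre_scltl_not; infer_instance
def pvWitness_scltl_not : List String := (["p"])
def Spec_scltl_not (args : List String) (out : String) : Prop := out = scltl_not_alt args
instance (args : List String) (out : String) : Decidable (Spec_scltl_not args out) := by unfold Spec_scltl_not; infer_instance

-- ===== CLAIM (what is proved, stated in full; the proofs are below) =====
def Claim_equal_scltl_not : Prop := ∀ (args : List String), Dom_scltl_not args → Pre_scltl_not args → Spec_scltl_not args (scltl_not args)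

-- ===== LEMMAS AND PROOFS =====
theorem foldl_str_append (l : List String) (a : String) :
    l.foldl (· ++ ·) a = a ++ l.foldl (· ++ ·) "" := by
  induction l generalizing a with
  | nil => simp
  | cons x xs ih =>
      simp only [List.foldl_cons]
      rw [ih (a ++ x), ih ("" ++ x)]
      simp [String.append_assoc]

theorem join_cons (s : String) (l : List String) : String.join (s :: l) = s ++ String.join l := by
  simp only [String.join, List.foldl_cons]
  rw [foldl_str_append]
  simp

theorem join_rep_comm (n : Nat) (s : String) :
    String.join (List.replicate n s) ++ s = s ++ String.join (List.replicate n s) := by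
  induction n with
  | zero => simp [String.join]
  | succ m ih =>
      rw [List.replicate_succ, join_cons, String.append_assoc, ih]

theorem foldl_wrap (l : List String) (f : String) :
    l.foldl (fun acc _ => "!(" ++ acc ++ ")") f
      = String.join (List.replicate l.length "!(") ++ f ++ String.join (List.replicate l.length ")") := by
  induction l generalizing f with
  | nil => simp [String.join]
  | cons x xs ih =>
      rw [List.foldl_cons, ih, List.length_cons, List.replicate_succ, List.replicate_succ, join_cons, join_cons]
      simp only [← String.append_assoc]
      rw [join_rep_comm]

-- ===== VERDICT (by name: the statement is the Claim_ definition above) =====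
theorem scltl_not_spec : Claim_equal_scltl_not := by
  intro args _ hne
  unfold Spec_scltl_not scltl_not scltl_not_alt
  rw [PySem.List.slice_to_neg_one, foldl_wrap, List.length_dropLast,
      PySem.List.pyGetD_neg_one (h := hne)]
  by_cases h1 : args.length = 1
  · obtain ⟨a, rfl⟩ : ∃ a, args = [a] := by
      match args, h1 with
      | [a], _ => exact ⟨a, rfl⟩
    simp [PySem.List.pyGetD_zero_cons, String.join, List.getLast]
  · simp [h1]
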